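-- pv_equiv track=rewrite | github.com/D0n9-KG/LogicKG | backend/app/citations/models.py | derive_polarity
-- ===== SOURCE A (Python) =====
-- from collections.abc import Iterable
--
-- _POSITIVE_PURPOSES = {'SupportEvidence', 'ExtendImprove', 'MethodUse', 'Theory', 'DataTool'}
--
-- _NEGATIVE_PURPOSES = {'CritiqueLimit'}
--
-- def _clean_labels(labels: Iterable[object] | None) -> list[str]:
--     cleaned: list[str] = []
--     for item in labels or []:
--         value = str(item or '').strip()
--         if value and value not in cleaned:
--             cleaned.append(value)
--     return cleaned
--
-- def derive_polarity(labels: Iterable[object] | None, scores: Iterable[object] | None = None) -> str: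
--     cleaned = _clean_labels(labels)
--     if not cleaned:
--         return 'neutral'
--     positive = any(label in _POSITIVE_PURPOSES for label in cleaned)
--     negative = any(label in _NEGATIVE_PURPOSES for label in cleaned)
--     if positive and negative:
--         return 'mixed'
--     if negative:
--         return 'negative'
--     if positive:
--         return 'positive'
--     return 'neutral'
-- ===== SOURCE B (Python) =====
-- _POSITIVE_PURPOSES = {'SupportEvidence', 'ExtendImprove', 'MethodUse', 'Theory', 'DataTool'}
--
-- _NEGATIVE_PURPOSES = {'CritiqueLimit'}
--
-- def derive_polarity(labels, scores=None):
--     saw_any = positive = negative = False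
--     for item in labels or []:
--         value = str(item or '').strip()
--         if value:
--             saw_any = True
--             if value in _POSITIVE_PURPOSES:
--                 positive = True
--             elif value in _NEGATIVE_PURPOSES:
--                 negative = True
--     if not saw_any:
--         return 'neutral'
--     if positive and negative:
--         return 'mixed'
--     if negative:
--         return 'negative'
--     if positive:
--         return 'positive'
--     return 'neutral'
-- ===== Notes on version B (the rewrite author's own statement) =====
-- stated objective: faster
-- what changed: Replaces the build-a-deduped-list-then-two-any-scans structure with a single pass keeping three booleans (saw_any/positive/negative); the intermediate cleaned list and both any() scans disappear, which is sound because dedup cannot change an any() and the two purpose sets are disjoint.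
import Mathlib
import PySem

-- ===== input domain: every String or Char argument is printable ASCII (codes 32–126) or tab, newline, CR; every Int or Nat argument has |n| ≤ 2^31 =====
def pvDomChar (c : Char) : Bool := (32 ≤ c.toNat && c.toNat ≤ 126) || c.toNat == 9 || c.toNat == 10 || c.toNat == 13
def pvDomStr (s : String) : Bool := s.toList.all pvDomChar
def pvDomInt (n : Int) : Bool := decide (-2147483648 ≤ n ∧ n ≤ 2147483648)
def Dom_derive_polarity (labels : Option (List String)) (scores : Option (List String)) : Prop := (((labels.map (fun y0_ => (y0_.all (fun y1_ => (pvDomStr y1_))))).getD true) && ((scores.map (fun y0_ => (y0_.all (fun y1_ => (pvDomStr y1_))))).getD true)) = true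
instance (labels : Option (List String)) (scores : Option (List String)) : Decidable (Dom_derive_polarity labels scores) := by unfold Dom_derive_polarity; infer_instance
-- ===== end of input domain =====

-- B: one pass over the raw labels with three booleans, replacing A's deduped
-- intermediate list and its two separate any() scans (objective: simpler).

-- ===== PORT A =====
def pvPos : PySem.Set String :=
  PySem.Set.ofList ["SupportEvidence", "ExtendImprove", "MethodUse", "Theory", "DataTool"]

def pvNeg : PySem.Set String := PySem.Set.ofList ["CritiqueLimit"]

-- str(item or '').strip() for a string item: 'item or \'\'' is item if nonempty else ''
def pvStripVal (x : String) : String := PySem.Str.strip (if x == "" then "" else x)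

-- _clean_labels' loop: accumulate distinct nonempty stripped values
def pvCleanAux : List String → List String → List String
  | acc, [] => acc
  | acc, x :: xs =>
      let value := pvStripVal x
      if !(value == "") && !acc.contains value then pvCleanAux (acc ++ [value]) xs
      else pvCleanAux acc xs

def derive_polarity (labels : Option (List String)) (scores : Option (List String)) : String :=
  let cleaned := pvCleanAux [] (labels.getD [])
  if cleaned = [] then "neutral"
  else
    let positive := cleaned.any (fun l => PySem.Set.contains pvPos l)
    let negative := cleaned.any (fun l => PySem.Set.contains pvNeg l)
    if positive && negative then "mixed"
    else if negative then "negative"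
    else if positive then "positive"
    else "neutral"

-- ===== PORT B =====
-- B's single loop: state (saw_any, positive, negative)
def pvAltLoop : Bool × Bool × Bool → List String → Bool × Bool × Bool
  | s, [] => s
  | (saw, pos, neg), x :: xs =>
      let value := pvStripVal x
      if !(value == "") then
        if PySem.Set.contains pvPos value then pvAltLoop (true, true, neg) xs
        else if PySem.Set.contains pvNeg value then pvAltLoop (true, pos, true) xs
        else pvAltLoop (true, pos, neg) xs
      else pvAltLoop (saw, pos, neg) xs

def derive_polarity_alt (labels : Option (List String)) (scores : Option (List String)) : String :=
  match pvAltLoop (false, false, false) (labels.getD []) with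
  | (saw, pos, neg) =>
    if !saw then "neutral"
    else if pos && neg then "mixed"
    else if neg then "negative"
    else if pos then "positive"
    else "neutral"

-- ===== PRECONDITION & SPEC =====
def Spec_derive_polarity (labels : Option (List String)) (scores : Option (List String)) (out : String) : Prop := out = derive_polarity_alt labels scores
instance (labels : Option (List String)) (scores : Option (List String)) (out : String) : Decidable (Spec_derive_polarity labels scores out) := by unfold Spec_derive_polarity; infer_instance

-- ===== CLAIM (what is proved, stated in full; the proofs are below) =====
def Claim_equal_derive_polarity : Prop := ∀ (labels : Option (List String)) (scores : Option (List String)), Dom_derive_polarity labels scores → Spec_derive_polarity labels scores (derive_polarity labels scores)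

-- ===== LEMMAS AND PROOFS =====

-- any over A's deduped cleaned list = any over the nonempty stripped raw values
theorem pvCleanAux_any (l : List String) (acc : List String) (p : String → Bool) :
    (pvCleanAux acc l).any p
      = (acc.any p || l.any (fun x => !(pvStripVal x == "") && p (pvStripVal x))) := by
  induction l generalizing acc with
  | nil => simp [pvCleanAux]
  | cons x xs ih =>
    simp only [pvCleanAux, List.any_cons]
    by_cases he : pvStripVal x = ""
    · simp [he, ih]
    · have hbe : (pvStripVal x == "") = false := by simp [he]
      by_cases hm : pvStripVal x ∈ acc
      · rw [if_neg (by simp [hbe, hm])]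
        rw [ih]
        by_cases hp : p (pvStripVal x) = true
        · have hacc : acc.any p = true := List.any_of_mem hm hp
          simp [hacc, hp]
        · simp [hbe, Bool.eq_false_iff.mpr hp]
      · rw [if_pos (by simp [hbe, hm])]
        rw [ih]
        simp [hbe, Bool.or_assoc]

theorem pvAltLoop_eq (l : List String) (saw pos neg : Bool) :
    pvAltLoop (saw, pos, neg) l
      = (saw || l.any (fun x => !(pvStripVal x == "")),
         pos || l.any (fun x => !(pvStripVal x == "") && PySem.Set.contains pvPos (pvStripVal x)),
         neg || l.any (fun x => !(pvStripVal x == "")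
                  && (!(PySem.Set.contains pvPos (pvStripVal x))
                        && PySem.Set.contains pvNeg (pvStripVal x)))) := by
  induction l generalizing saw pos neg with
  | nil => simp [pvAltLoop]
  | cons x xs ih =>
    simp only [pvAltLoop, List.any_cons]
    by_cases he : pvStripVal x = ""
    · simp [he, ih]
    · have hbe : (pvStripVal x == "") = false := by simp [he]
      by_cases hp : pvStripVal x ∈ pvPos
      · simp [hbe, PySem.Set.contains, hp, ih, Bool.or_assoc]
      · by_cases hn : pvStripVal x ∈ pvNeg
        · simp [hbe, PySem.Set.contains, hp, hn, ih, Bool.or_assoc]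
        · simp [hbe, PySem.Set.contains, hp, hn, ih, Bool.or_assoc]

-- the positive and negative purpose sets are disjoint
theorem pvMemDisj (v : String) (hv : v ∈ pvNeg) : v ∉ pvPos := by
  have hv' : v ∈ ["CritiqueLimit"] := hv
  have : v = "CritiqueLimit" := by simpa using hv'
  subst this; decide

theorem pvCleanAux_nil_iff (l : List String) :
    (pvCleanAux [] l = []) ↔ (l.any (fun x => !(pvStripVal x == "")) = false) := by
  have h := pvCleanAux_any l [] (fun _ => true)
  simp only [List.any_nil, Bool.false_or, Bool.and_true] at h
  constructor
  · intro hnil; rw [← h, hnil]; simp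
  · intro hany
    rw [hany] at h
    cases hc : pvCleanAux [] l with
    | nil => rfl
    | cons a as => rw [hc] at h; simp at h

-- ===== VERDICT (by name: the statement is the Claim_ definition above) =====
theorem derive_polarity_spec : Claim_equal_derive_polarity := by
  intro labels scores _
  unfold Spec_derive_polarity derive_polarity derive_polarity_alt
  rw [pvAltLoop_eq]
  cases hE : (labels.getD []).any (fun x => !(pvStripVal x == "")) with
  | false =>
      rw [if_pos ((pvCleanAux_nil_iff _).mpr hE)]
      simp [hE]
  | true =>
      rw [if_neg (fun hnil => by rw [(pvCleanAux_nil_iff _).mp hnil] at hE; cases hE)]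
      rw [pvCleanAux_any, pvCleanAux_any]
      have HN : (∃ x ∈ labels.getD [], ¬pvStripVal x = "" ∧ pvStripVal x ∉ pvPos ∧ pvStripVal x ∈ pvNeg)
          ↔ (∃ x ∈ labels.getD [], ¬pvStripVal x = "" ∧ pvStripVal x ∈ pvNeg) := by
        constructor
        · rintro ⟨x, hx, h1, _, h3⟩; exact ⟨x, hx, h1, h3⟩
        · rintro ⟨x, hx, h1, h3⟩; exact ⟨x, hx, h1, pvMemDisj _ h3, h3⟩
      simp [hE, HN]
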